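-- pv_equiv track=rewrite | github.com/igtl314/impa | 13038_2.py | deepFirst
-- ===== SOURCE A (Python) =====
-- def deepFirst(tree, start, sets, memo):
--     visited = set()
--     toTraverse = [start]
--     while toTraverse:
--         current = toTraverse.pop()
--         if current not in visited:
--             visited.add(current)
--             if current in tree:
--                 for child in tree[current]:
--                     if not any(child in s for s in sets):
--                         toTraverse.append(child)
--     memo[start] = visited
--     return visited
-- ===== SOURCE B (Python) =====
-- def deepFirst(tree, start, sets, memo):
--     # Iterator-frame DFS: a stack of child iterators (one frame per visited
--     # node) instead of A's node stack with duplicate/deferred visited checks.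
--     # Nodes are marked when discovered, never stored twice.
--     visited = set()
--
--     def allowed_children(node):
--         return [c for c in reversed(tree.get(node, []))
--                 if not any(c in s for s in sets)]
--
--     visited.add(start)
--     frames = [iter(allowed_children(start))]
--     while frames:
--         child = next(frames[-1], None)
--         if child is None:
--             frames.pop()
--         elif child not in visited:
--             visited.add(child)
--             frames.append(iter(allowed_children(child)))
--     memo[start] = visited
--     return visited
-- ===== Notes on version B (the rewrite author's own statement) =====
-- stated objective: alternative
-- what changed: Replaces A's node stack (which stores duplicate nodes and defers the visited check to pop time) by the iterator-frame DFS: a stack of child iterators, one frame per visited node, marking each node once at discovery, so no node is ever stored twice.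
import Mathlib
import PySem

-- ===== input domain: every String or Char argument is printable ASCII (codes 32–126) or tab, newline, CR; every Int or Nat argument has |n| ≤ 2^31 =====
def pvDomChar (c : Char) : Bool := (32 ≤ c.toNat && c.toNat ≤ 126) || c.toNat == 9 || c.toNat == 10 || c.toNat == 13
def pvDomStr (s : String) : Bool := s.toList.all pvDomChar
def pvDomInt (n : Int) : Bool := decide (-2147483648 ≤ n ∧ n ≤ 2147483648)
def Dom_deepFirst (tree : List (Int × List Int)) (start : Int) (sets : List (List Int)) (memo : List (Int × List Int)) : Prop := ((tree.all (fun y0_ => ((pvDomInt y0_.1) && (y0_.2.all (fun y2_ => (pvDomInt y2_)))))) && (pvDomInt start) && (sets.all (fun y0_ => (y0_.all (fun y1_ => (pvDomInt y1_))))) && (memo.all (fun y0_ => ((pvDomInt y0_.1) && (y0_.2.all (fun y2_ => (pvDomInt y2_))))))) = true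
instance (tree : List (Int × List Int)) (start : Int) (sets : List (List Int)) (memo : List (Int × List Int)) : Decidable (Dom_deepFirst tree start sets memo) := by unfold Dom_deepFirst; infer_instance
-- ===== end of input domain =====

-- B replaces A's node stack (duplicates, visited check deferred to pop) by an iterator-frame
-- DFS (one child-iterator frame per visited node, marking at discovery); same visited set, same
-- insertion order.  Both Pythons also store the result in memo[start]; the equivalence proved
-- here is about the RETURN value only (both perform the same mutation).
-- Both loop ports carry a fuel guard (a generous bound on the number of loop iterations,
-- computed from the input) that only makes the same computation total; the proofs show it
-- never runs out.

-- shared fuel helpers (guards only)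
def pvK (tree : List (Int × List Int)) : Nat := (tree.flatMap (·.2)).length
def pvAllNodes (tree : List (Int × List Int)) (start : Int) : List Int :=
  PySem.List.dedup (start :: tree.flatMap (·.2))
def pvM (tree : List (Int × List Int)) (start : Int) : Nat := (pvAllNodes tree start).length

-- ===== PORT A =====
-- while toTraverse: current = toTraverse.pop(); … — stack top at the HEAD of the Lean list
def pvLoopA (tree : List (Int × List Int)) (sets : List (List Int)) :
    Nat → List Int → List Int → List Int
  | 0, visited, _ => visited
  | _ + 1, visited, [] => visited
  | fuel + 1, visited, current :: rest =>
    if (PySem.Set.contains visited current) then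
      pvLoopA tree sets fuel visited rest
    else
      let visited' := PySem.Set.add visited current
      let stack' :=
        if (PySem.Dict.mk tree).contains current then
          ((PySem.Dict.mk tree).getD current []).foldl
            (fun st child => if !(sets.any fun s => s.contains child) then child :: st else st)
            rest
        else rest
      pvLoopA tree sets fuel visited' stack'

def deepFirst (tree : List (Int × List Int)) (start : Int) (sets : List (List Int)) (memo : List (Int × List Int)) : List Int :=
  pvLoopA tree sets ((pvK tree + 2) * (pvM tree start + 2)) PySem.Set.empty [start]

-- ===== PORT B =====
-- allowed_children(node) of Source B
def pvAllowedKids (tree : List (Int × List Int)) (sets : List (List Int)) (node : Int) : List Int :=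
  ((PySem.Dict.mk tree).getD node []).reverse.filter (fun c => !(sets.any fun s => s.contains c))

-- while frames: … — each frame is the remaining elements of its child iterator, top frame at the HEAD
def pvLoopB (tree : List (Int × List Int)) (sets : List (List Int)) :
    Nat → List Int → List (List Int) → List Int
  | 0, visited, _ => visited
  | _ + 1, visited, [] => visited
  | fuel + 1, visited, [] :: frames => pvLoopB tree sets fuel visited frames
  | fuel + 1, visited, (child :: it) :: frames =>
    if PySem.Set.contains visited child then
      pvLoopB tree sets fuel visited (it :: frames)
    else
      pvLoopB tree sets fuel (PySem.Set.add visited child)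
        (pvAllowedKids tree sets child :: it :: frames)

def deepFirst_alt (tree : List (Int × List Int)) (start : Int) (sets : List (List Int)) (memo : List (Int × List Int)) : List Int :=
  pvLoopB tree sets ((pvK tree + 3) * (pvM tree start + 2))
    (PySem.Set.add PySem.Set.empty start) [pvAllowedKids tree sets start]

-- ===== PRECONDITION & SPEC =====
def Spec_deepFirst (tree : List (Int × List Int)) (start : Int) (sets : List (List Int)) (memo : List (Int × List Int)) (out : List Int) : Prop := out = deepFirst_alt tree start sets memo
instance (tree : List (Int × List Int)) (start : Int) (sets : List (List Int)) (memo : List (Int × List Int)) (out : List Int) : Decidable (Spec_deepFirst tree start sets memo out) := by unfold Spec_deepFirst; infer_instance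

-- ===== CLAIM (what is proved, stated in full; the proofs are below) =====
def Claim_equal_deepFirst : Prop := ∀ (tree : List (Int × List Int)) (start : Int) (sets : List (List Int)) (memo : List (Int × List Int)), Dom_deepFirst tree start sets memo → Spec_deepFirst tree start sets memo (deepFirst tree start sets memo)

-- ===== LEMMAS AND PROOFS =====

-- number of universe nodes not yet visited
def pvFree (allN visited : List Int) : Nat :=
  (allN.filter (fun x => !(visited.contains x))).length

-- A's inner push loop is reverse-filter-append
theorem pv_foldl_push (sets : List (List Int)) :
    ∀ (l st : List Int),
      l.foldl (fun st child => if !(sets.any fun s => s.contains child) then child :: st else st) st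
        = (l.filter (fun c => !(sets.any fun s => s.contains c))).reverse ++ st := by
  intro l
  induction l with
  | nil => intro st; simp
  | cons a t ih =>
    intro st
    cases hb : (sets.any fun s => s.contains a) with
    | true => simp only [List.foldl_cons, List.filter_cons, hb, Bool.not_true,
        Bool.false_eq_true, if_false, ih]
    | false => simp only [List.foldl_cons, List.filter_cons, hb, Bool.not_false, if_true, ih,
        List.reverse_cons, List.append_assoc, List.singleton_append]

-- A's new stack equals B's new frame appended to the rest
theorem pv_stackA (tree : List (Int × List Int)) (sets : List (List Int)) (c : Int) (rest : List Int) :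
    (if (PySem.Dict.mk tree).contains c then
        ((PySem.Dict.mk tree).getD c []).foldl
          (fun st child => if !(sets.any fun s => s.contains child) then child :: st else st) rest
      else rest)
      = pvAllowedKids tree sets c ++ rest := by
  by_cases h : (PySem.Dict.mk tree).contains c = true
  · simp only [h, if_true, pv_foldl_push, pvAllowedKids, List.filter_reverse]
  · simp only [h, if_false, pvAllowedKids,
      PySem.Dict.getD_of_not_contains _ _ (eq_false_of_ne_true h), List.filter_nil,
      List.reverse_nil, List.nil_append, Bool.false_eq_true]

theorem pv_getD_nil (c : Int) : (PySem.Dict.mk ([] : List (Int × List Int))).getD c [] = [] := by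
  simp [PySem.Dict.getD, PySem.Dict.get?]

theorem pv_getD_cons (k : Int) (vs : List Int) (t : List (Int × List Int)) (c : Int) :
    (PySem.Dict.mk ((k, vs) :: t)).getD c [] = if k == c then vs else (PySem.Dict.mk t).getD c [] := by
  simp only [PySem.Dict.getD_eq_get?_getD, PySem.Dict.get?_mk_cons]
  split <;> rfl

theorem pv_getD_length (tree : List (Int × List Int)) (c : Int) :
    ((PySem.Dict.mk tree).getD c []).length ≤ pvK tree := by
  induction tree with
  | nil => simp [pv_getD_nil, pvK]
  | cons p t ih =>
    obtain ⟨k, vs⟩ := p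
    rw [pv_getD_cons]
    have hk : pvK ((k, vs) :: t) = vs.length + pvK t := by
      simp [pvK, List.flatMap_cons]
    split <;> omega

theorem pv_getD_mem (tree : List (Int × List Int)) (c x : Int)
    (hx : x ∈ (PySem.Dict.mk tree).getD c []) : x ∈ tree.flatMap (·.2) := by
  induction tree with
  | nil => rw [pv_getD_nil] at hx; cases hx
  | cons p t ih =>
    obtain ⟨k, vs⟩ := p
    rw [pv_getD_cons] at hx
    simp only [List.flatMap_cons, List.mem_append]
    by_cases hkc : (k == c) = true
    · rw [if_pos hkc] at hx; exact Or.inl hx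
    · rw [if_neg hkc] at hx; exact Or.inr (ih hx)

theorem pv_kids_length (tree : List (Int × List Int)) (sets : List (List Int)) (c : Int) :
    (pvAllowedKids tree sets c).length ≤ pvK tree := by
  have h1 := List.length_filter_le (fun c => !(sets.any fun s => s.contains c))
    ((PySem.Dict.mk tree).getD c []).reverse
  have h2 := pv_getD_length tree c
  simp only [List.length_reverse] at h1
  exact le_trans h1 h2

theorem pv_kids_mem (tree : List (Int × List Int)) (start : Int) (sets : List (List Int)) (c x : Int)
    (hx : x ∈ pvAllowedKids tree sets c) : x ∈ pvAllNodes tree start := by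
  unfold pvAllowedKids at hx
  have hx' : x ∈ (PySem.Dict.mk tree).getD c [] := by
    have := List.mem_of_mem_filter hx
    simpa using this
  unfold pvAllNodes
  rw [PySem.List.mem_dedup]
  exact List.mem_cons_of_mem _ (pv_getD_mem tree c x hx')

theorem pv_len_filter_ne {l : List Int} (hnd : l.Nodup) {c : Int} (hc : c ∈ l) :
    (l.filter (fun x => !decide (x = c))).length + 1 = l.length := by
  induction l with
  | nil => cases hc
  | cons a t ih =>
    rw [List.nodup_cons] at hnd
    simp only [List.filter_cons]
    by_cases hac : a = c
    · subst hac
      simp only [decide_true, Bool.not_true, Bool.false_eq_true, if_false]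
      have : t.filter (fun x => !decide (x = a)) = t := by
        rw [List.filter_eq_self]
        intro x hx
        simp only [Bool.not_eq_true', decide_eq_false_iff_not]
        intro hxa; exact hnd.1 (hxa ▸ hx)
      rw [this]; simp
    · have hct : c ∈ t := by
        cases hc with
        | head => exact absurd rfl hac
        | tail _ h => exact h
      simp only [hac, decide_false, Bool.not_false, if_true, List.length_cons]
      rw [ih hnd.2 hct]


theorem pv_free_add (allN : List Int) (hnd : allN.Nodup) (v : List Int) (c : Int)
    (hc : c ∈ allN) (hv : v.contains c = false) :
    pvFree allN (PySem.Set.add v c) + 1 = pvFree allN v := by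
  have hcv : c ∉ v := by simpa using hv
  have key : ∀ (w : List Int), pvFree allN w = (allN.filter (fun x => !decide (x ∈ w))).length := by
    intro w; unfold pvFree; simp
  rw [PySem.Set.add_of_not_mem hcv, key, key]
  have hpred : allN.filter (fun x => !decide (x ∈ v ++ [c]))
      = allN.filter (fun x => !decide (x ∈ v) && !decide (x = c)) := by
    apply List.filter_congr
    intro x _
    by_cases h1 : x ∈ v <;> by_cases h2 : x = c <;> simp [h1, h2]
  have hsplit : allN.filter (fun x => !decide (x ∈ v) && !decide (x = c))
      = (allN.filter (fun x => !decide (x ∈ v))).filter (fun x => !decide (x = c)) := by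
    rw [List.filter_filter]
    apply List.filter_congr
    intro x _
    exact Bool.and_comm _ _
  rw [hpred, hsplit]
  have hnd' : (allN.filter (fun x => !decide (x ∈ v))).Nodup := List.Nodup.filter _ hnd
  have hc' : c ∈ allN.filter (fun x => !decide (x ∈ v)) := by
    rw [List.mem_filter]
    exact ⟨hc, by simpa using hcv⟩
  exact pv_len_filter_ne hnd' hc'


theorem pv_sim (tree : List (Int × List Int)) (start : Int) (sets : List (List Int)) :
    ∀ (fB fA : Nat) (v : List Int) (F : List (List Int)),
      (∀ x ∈ F.flatten, x ∈ pvAllNodes tree start) →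
      F.flatten.length + (pvK tree + 1) * pvFree (pvAllNodes tree start) v ≤ fA →
      F.flatten.length + F.length + (pvK tree + 2) * pvFree (pvAllNodes tree start) v ≤ fB →
      pvLoopA tree sets fA v F.flatten = pvLoopB tree sets fB v F := by
  intro fB
  induction fB with
  | zero =>
    intro fA v F hsub hA hB
    have hF : F = [] := by
      cases F with
      | nil => rfl
      | cons f F' =>
        exfalso
        simp only [List.length_cons] at hB
        generalize (pvK tree + 2) * pvFree (pvAllNodes tree start) v = Q at hB
        omega
    subst hF
    simp only [List.flatten_nil]
    cases fA <;> rfl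
  | succ g ih =>
    intro fA v F hsub hA hB
    cases F with
    | nil =>
      simp only [List.flatten_nil]
      cases fA <;> rfl
    | cons f F' =>
      cases f with
      | nil =>
        have hfl : (([] : List Int) :: F').flatten = F'.flatten := by simp
        rw [hfl] at hsub hA hB ⊢
        have hstep : pvLoopB tree sets (g + 1) v ([] :: F') = pvLoopB tree sets g v F' := rfl
        rw [hstep]
        refine ih fA v F' hsub hA ?_
        simp only [List.length_cons] at hB
        generalize (pvK tree + 2) * pvFree (pvAllNodes tree start) v = Q at hB ⊢
        omega
      | cons c it =>
        have hfl : ((c :: it) :: F').flatten = c :: (it ++ F'.flatten) := by simp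
        rw [hfl] at hsub hA hB ⊢
        cases fA with
        | zero =>
          exfalso
          simp only [List.length_cons] at hA
          generalize (pvK tree + 1) * pvFree (pvAllNodes tree start) v = P at hA
          omega
        | succ fa =>
          have eqA : pvLoopA tree sets (fa + 1) v (c :: (it ++ F'.flatten))
              = if PySem.Set.contains v c then pvLoopA tree sets fa v (it ++ F'.flatten)
                else pvLoopA tree sets fa (PySem.Set.add v c)
                  (if (PySem.Dict.mk tree).contains c then
                      ((PySem.Dict.mk tree).getD c []).foldl
                        (fun st child =>
                          if !(sets.any fun s => s.contains child) then child :: st else st)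
                        (it ++ F'.flatten)
                    else (it ++ F'.flatten)) := rfl
          have eqB : pvLoopB tree sets (g + 1) v ((c :: it) :: F')
              = if PySem.Set.contains v c then pvLoopB tree sets g v (it :: F')
                else pvLoopB tree sets g (PySem.Set.add v c)
                  (pvAllowedKids tree sets c :: it :: F') := rfl
          rw [eqA, eqB]
          by_cases hvc : PySem.Set.contains v c = true
          · rw [if_pos hvc, if_pos hvc]
            have h1 : (it :: F').flatten = it ++ F'.flatten := by simp
            have := ih fa v (it :: F')
              (by rw [h1]; intro x hx; exact hsub x (List.mem_cons_of_mem _ hx))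
              (by rw [h1]
                  simp only [List.length_cons, List.length_append] at hA ⊢
                  generalize (pvK tree + 1) * pvFree (pvAllNodes tree start) v = P at hA ⊢
                  omega)
              (by rw [h1]
                  simp only [List.length_cons, List.length_append] at hB ⊢
                  generalize (pvK tree + 2) * pvFree (pvAllNodes tree start) v = Q at hB ⊢
                  omega)
            rw [h1] at this
            exact this
          · rw [if_neg hvc, if_neg hvc, pv_stackA]
            have hcAll : c ∈ pvAllNodes tree start := hsub c List.mem_cons_self
            have hvF : v.contains c = false := by
              rw [← PySem.Set.contains_eq_listContains]
              exact eq_false_of_ne_true hvc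
            have hndAll : (pvAllNodes tree start).Nodup := by
              unfold pvAllNodes; exact PySem.List.nodup_dedup _
            have hfree := pv_free_add (pvAllNodes tree start) hndAll v c hcAll hvF
            have hkids := pv_kids_length tree sets c
            have h1 : (pvAllowedKids tree sets c :: it :: F').flatten
                = pvAllowedKids tree sets c ++ (it ++ F'.flatten) := by simp
            have := ih fa (PySem.Set.add v c) (pvAllowedKids tree sets c :: it :: F')
              (by rw [h1]
                  intro x hx
                  rcases List.mem_append.mp hx with hx1 | hx2
                  · exact pv_kids_mem tree start sets c x hx1
                  · exact hsub x (List.mem_cons_of_mem _ hx2))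
              (by rw [h1]
                  simp only [List.length_cons, List.length_append] at hA ⊢
                  rw [← hfree, Nat.mul_succ] at hA
                  generalize (pvK tree + 1) * pvFree (pvAllNodes tree start) (PySem.Set.add v c) = P at hA ⊢
                  omega)
              (by rw [h1]
                  simp only [List.length_cons, List.length_append] at hB ⊢
                  rw [← hfree, Nat.mul_succ] at hB
                  generalize (pvK tree + 2) * pvFree (pvAllNodes tree start) (PySem.Set.add v c) = Q at hB ⊢
                  omega)
            rw [h1] at this
            exact this

-- ===== VERDICT (by name: the statement is the Claim_ definition above) =====
theorem deepFirst_spec : Claim_equal_deepFirst := by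
  intro tree start sets memo _
  unfold Spec_deepFirst deepFirst deepFirst_alt
  have hpos : 0 < (pvK tree + 2) * (pvM tree start + 2) :=
    Nat.mul_pos (by omega) (by omega)
  have hfa : (pvK tree + 2) * (pvM tree start + 2)
      = ((pvK tree + 2) * (pvM tree start + 2) - 1) + 1 := (Nat.succ_pred_eq_of_pos hpos).symm
  rw [hfa]
  have eqA : pvLoopA tree sets (((pvK tree + 2) * (pvM tree start + 2) - 1) + 1)
        PySem.Set.empty [start]
      = if PySem.Set.contains PySem.Set.empty start then
          pvLoopA tree sets ((pvK tree + 2) * (pvM tree start + 2) - 1) PySem.Set.empty []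
        else
          pvLoopA tree sets ((pvK tree + 2) * (pvM tree start + 2) - 1)
            (PySem.Set.add PySem.Set.empty start)
            (if (PySem.Dict.mk tree).contains start then
                ((PySem.Dict.mk tree).getD start []).foldl
                  (fun st child =>
                    if !(sets.any fun s => s.contains child) then child :: st else st) []
              else []) := rfl
  have hcs : PySem.Set.contains PySem.Set.empty start = false := rfl
  rw [eqA, if_neg (by rw [hcs]; exact Bool.false_ne_true), pv_stackA]
  have hkids := pv_kids_length tree sets start
  have hfree_le : pvFree (pvAllNodes tree start) (PySem.Set.add PySem.Set.empty start)
      ≤ pvM tree start := List.length_filter_le _ _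
  have hexpA : (pvK tree + 2) * (pvM tree start + 2)
      = pvK tree * pvM tree start + 2 * pvK tree + 2 * pvM tree start + 4 := by ring
  have hexpB : (pvK tree + 3) * (pvM tree start + 2)
      = pvK tree * pvM tree start + 2 * pvK tree + 3 * pvM tree start + 6 := by ring
  have hmulA : (pvK tree + 1) * pvFree (pvAllNodes tree start) (PySem.Set.add PySem.Set.empty start)
      ≤ pvK tree * pvM tree start + pvM tree start := by
    calc (pvK tree + 1) * pvFree (pvAllNodes tree start) (PySem.Set.add PySem.Set.empty start)
        ≤ (pvK tree + 1) * pvM tree start := Nat.mul_le_mul_left _ hfree_le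
      _ = pvK tree * pvM tree start + pvM tree start := by ring
  have hmulB : (pvK tree + 2) * pvFree (pvAllNodes tree start) (PySem.Set.add PySem.Set.empty start)
      ≤ pvK tree * pvM tree start + 2 * pvM tree start := by
    calc (pvK tree + 2) * pvFree (pvAllNodes tree start) (PySem.Set.add PySem.Set.empty start)
        ≤ (pvK tree + 2) * pvM tree start := Nat.mul_le_mul_left _ hfree_le
      _ = pvK tree * pvM tree start + 2 * pvM tree start := by ring
  refine pv_sim tree start sets ((pvK tree + 3) * (pvM tree start + 2))
    ((pvK tree + 2) * (pvM tree start + 2) - 1)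
    (PySem.Set.add PySem.Set.empty start) [pvAllowedKids tree sets start] ?_ ?_ ?_
  · intro x hx
    simp only [List.flatten_cons, List.flatten_nil, List.append_nil] at hx
    exact pv_kids_mem tree start sets start x hx
  · simp only [List.flatten_cons, List.flatten_nil, List.append_nil]
    generalize hP : (pvK tree + 1) * pvFree (pvAllNodes tree start)
      (PySem.Set.add PySem.Set.empty start) = P at hmulA ⊢
    omega
  · simp only [List.flatten_cons, List.flatten_nil, List.append_nil, List.length_cons,
      List.length_nil]
    rw [hexpB]
    generalize hQ : (pvK tree + 2) * pvFree (pvAllNodes tree start)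
      (PySem.Set.add PySem.Set.empty start) = Q at hmulB ⊢
    omega
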